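-- pv_equiv track=rewrite | github.com/Ebdsaleh/100_days | day03/ex12/main.py | check_names
-- ===== SOURCE A (Python) =====
-- def check_names(names):
--     count1 = 0
--     count2 = 0
--     check1 = "true"
--     check2 = "love"
--     for char in names:
--         if char in check1:
--             count1 += 1
--         if char in check2:
--             count2 += 1
--     score = f"{count1}{count2}"
--     return int(score)
-- ===== SOURCE B (Python) =====
-- def check_names(names):
--     counts = {}
--     for ch in names:
--         counts[ch] = counts.get(ch, 0) + 1
--     count1 = sum(n for ch, n in counts.items() if ch in "true")
--     count2 = sum(n for ch, n in counts.items() if ch in "love")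
--     return int(f"{count1}{count2}")
-- ===== Notes on version B (the rewrite author's own statement) =====
-- stated objective: alternative
-- what changed: B builds a frequency table of the input in one pass and sums the counts of the distinct characters that occur in each of the two target words, instead of testing membership for every character of the input; the final textual concatenation of the two counts is kept.
import Mathlib
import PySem

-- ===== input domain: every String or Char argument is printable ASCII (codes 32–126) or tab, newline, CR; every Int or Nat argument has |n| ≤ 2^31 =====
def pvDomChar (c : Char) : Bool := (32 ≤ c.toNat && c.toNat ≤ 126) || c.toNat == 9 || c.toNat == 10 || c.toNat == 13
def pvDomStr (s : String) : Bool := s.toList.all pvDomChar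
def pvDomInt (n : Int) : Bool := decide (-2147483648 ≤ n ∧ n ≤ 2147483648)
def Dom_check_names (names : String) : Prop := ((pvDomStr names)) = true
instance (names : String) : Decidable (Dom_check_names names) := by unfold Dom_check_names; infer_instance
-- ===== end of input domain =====

-- B replaces A's per-character membership counting by a frequency table summed over the
-- distinct characters; same return value (the two counts concatenated as a decimal number).

-- ===== PORT A =====
-- 'char in "true"' on a 1-char string is character membership; int(score) always parses
-- (the string is two nonnegative decimal numerals), so getD 0 is never the fallback.
def check_names (names : String) : Int :=
  let r := names.toList.foldl (fun (p : Int × Int) ch =>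
    (if ch ∈ "true".toList then p.1 + 1 else p.1,
     if ch ∈ "love".toList then p.2 + 1 else p.2)) (0, 0)
  (PySem.Int.ofStr? (PySem.Int.toStr r.1 ++ PySem.Int.toStr r.2)).getD 0

-- ===== PORT B =====
def check_names_alt (names : String) : Int :=
  let counts := names.toList.foldl
    (fun (d : PySem.Dict Char Int) ch => d.insert ch (d.getD ch 0 + 1)) PySem.Dict.empty
  let count1 := ((counts.items.filter (fun p => p.1 ∈ "true".toList)).map Prod.snd).sum
  let count2 := ((counts.items.filter (fun p => p.1 ∈ "love".toList)).map Prod.snd).sum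
  (PySem.Int.ofStr? (PySem.Int.toStr count1 ++ PySem.Int.toStr count2)).getD 0

-- ===== PRECONDITION & SPEC =====
def Spec_check_names (names : String) (out : Int) : Prop := out = check_names_alt names
instance (names : String) (out : Int) : Decidable (Spec_check_names names out) := by unfold Spec_check_names; infer_instance

-- ===== CLAIM (what is proved, stated in full; the proofs are below) =====
def Claim_equal_check_names : Prop := ∀ (names : String), Dom_check_names names → Spec_check_names names (check_names names)

-- ===== LEMMAS AND PROOFS =====

-- A's loop accumulates the two membership counts.
theorem checkA_fold (l : List Char) (a b : Int) :
    l.foldl (fun (p : Int × Int) ch =>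
      (if ch ∈ "true".toList then p.1 + 1 else p.1,
       if ch ∈ "love".toList then p.2 + 1 else p.2)) (a, b)
    = (a + (l.countP (· ∈ "true".toList) : Int), b + (l.countP (· ∈ "love".toList) : Int)) := by
  induction l generalizing a b with
  | nil => simp
  | cons c t ih =>
    rw [List.foldl_cons, ih]
    simp only [List.countP_cons]
    refine Prod.ext ?_ ?_ <;> split_ifs <;> simp_all <;> omega

-- B's sum over the counter's items equals the membership count.
theorem checkB_sum (l : List Char) (s : String) :
    (((PySem.Dict.counter l).items.filter (fun p => p.1 ∈ s.toList)).map Prod.snd).sum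
    = (l.countP (· ∈ s.toList) : Int) := by
  have hperm : List.Perm (PySem.Set.ofList l) l.dedup :=
    (List.perm_ext_iff_of_nodup (PySem.Set.nodup_ofList l) l.nodup_dedup).2
      (fun x => by simp [PySem.Set.mem_ofList, List.mem_dedup])
  have h2 := ((hperm.filter (fun k => decide (k ∈ s.toList))).map
    (fun k => ((l.count k : Nat) : Int))).sum_eq
  rw [PySem.Dict.items_counter]
  simp only [List.filter_map, List.map_map, Function.comp_def]
  rw [h2, show (fun k => ((l.count k : Nat) : Int)) = (fun n : Nat => (n : Int)) ∘
      (fun k => l.count k) from rfl, ← List.map_map, ← Nat.cast_list_sum,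
    List.sum_map_count_dedup_filter_eq_countP]

-- ===== VERDICT (by name: the statement is the Claim_ definition above) =====
theorem check_names_spec : Claim_equal_check_names := by
  intro names _
  unfold Spec_check_names check_names check_names_alt
  simp only [PySem.Dict.foldl_insert_getD_add_one_eq_counter, checkA_fold, checkB_sum, zero_add]
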